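-- pv_equiv track=rewrite | github.com/Bl4ckSky28/CMPS-1500 | Recursion/lab7pr1.py | uppercount
-- ===== SOURCE A (Python) =====
-- def uppercount(s):
--     uppers = 'ABCDEFGHIJKLMNOPQRSTUVWXYZ'
--     if s == "":
--         return 0
--     #recursive case if first character is uppercase
--     elif s[0] in uppers:
--         return 1 + uppercount(s[1:])
--     #recursive case if first character is not uppercase
--     else:
--         return 0 + uppercount(s[1:])
-- ===== SOURCE B (Python) =====
-- def uppercount(s):
--     count = 0
--     for c in s:
--         if c in 'ABCDEFGHIJKLMNOPQRSTUVWXYZ':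
--             count += 1
--     return count
-- ===== Notes on version B (the rewrite author's own statement) =====
-- stated objective: faster
-- what changed: Replaced the recursive head/tail decomposition (one Python call frame and string slice per character) with a single iterative for-loop over the characters and an explicit accumulator.
import Mathlib
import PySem

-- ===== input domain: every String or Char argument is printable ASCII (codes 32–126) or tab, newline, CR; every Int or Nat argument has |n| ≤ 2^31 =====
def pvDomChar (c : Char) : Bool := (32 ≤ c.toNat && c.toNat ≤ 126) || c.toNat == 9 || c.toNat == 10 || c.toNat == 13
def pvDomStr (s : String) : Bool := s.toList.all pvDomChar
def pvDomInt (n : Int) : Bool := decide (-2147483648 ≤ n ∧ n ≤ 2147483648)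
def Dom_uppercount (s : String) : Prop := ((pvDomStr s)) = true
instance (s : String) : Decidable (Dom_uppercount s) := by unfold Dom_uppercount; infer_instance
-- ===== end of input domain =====

-- B replaces A's recursion (with per-call slicing) by one iterative accumulator loop.

-- ===== PORT A =====
-- A's membership string 'ABCDEFGHIJKLMNOPQRSTUVWXYZ'
def pvUppers : List Char := "ABCDEFGHIJKLMNOPQRSTUVWXYZ".toList

-- recursion on the characters: "" test, s[0], s[1:]
def uppercountChars : List Char → Int
  | [] => 0
  | c :: rest => if c ∈ pvUppers then 1 + uppercountChars rest else 0 + uppercountChars rest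

def uppercount (s : String) : Int := uppercountChars s.toList

-- ===== PORT B =====
-- iterative loop: count = 0; for c in s: if c in uppers: count += 1
def uppercount_alt (s : String) : Int :=
  s.toList.foldl (fun count c => if c ∈ pvUppers then count + 1 else count) 0

-- ===== PRECONDITION & SPEC =====
def Spec_uppercount (s : String) (out : Int) : Prop := out = uppercount_alt s
instance (s : String) (out : Int) : Decidable (Spec_uppercount s out) := by unfold Spec_uppercount; infer_instance

-- ===== CLAIM (what is proved, stated in full; the proofs are below) =====
def Claim_equal_uppercount : Prop := ∀ (s : String), Dom_uppercount s → Spec_uppercount s (uppercount s)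

-- ===== LEMMAS AND PROOFS =====
theorem foldl_eq_uppercountChars (l : List Char) (acc : Int) :
    l.foldl (fun count c => if c ∈ pvUppers then count + 1 else count) acc
      = acc + uppercountChars l := by
  induction l generalizing acc with
  | nil => simp [uppercountChars]
  | cons c rest ih =>
    simp only [List.foldl, uppercountChars]
    rw [ih]
    split <;> ring

-- ===== VERDICT (by name: the statement is the Claim_ definition above) =====
theorem uppercount_spec : Claim_equal_uppercount := by
  intro s _
  unfold Spec_uppercount uppercount uppercount_alt
  rw [foldl_eq_uppercountChars]
  ring
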